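-- pv_equiv track=rewrite | github.com/posl/comment_recommendation | script/mod_gen/1_time/en/222_D/9.py | get_num_of_sequences
-- ===== SOURCE A (Python) =====
-- def get_num_of_sequences(a, b):
--     def get_num_of_sequences_sub(a, b, a_idx, b_idx, dp):
--         if a_idx == len(a):
--             return 1
--         if dp[a_idx][b_idx] != -1:
--             return dp[a_idx][b_idx]
--         res = 0
--         for i in range(b_idx, len(b)):
--             if a[a_idx] <= b[i]:
--                 res += get_num_of_sequences_sub(a, b, a_idx + 1, i, dp)
--         dp[a_idx][b_idx] = res
--         return res
--     dp = [[-1 for _ in range(len(b))] for _ in range(len(a))]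
--     return get_num_of_sequences_sub(a, b, 0, 0, dp)
-- ===== SOURCE B (Python) =====
-- def get_num_of_sequences(a, b):
--     # Layered DP with suffix sums: O(len(a)*len(b)) instead of memoized
--     # recursion with an inner rescan.
--     if not a:
--         return 1
--     if not b:
--         return 0
--     n = len(b)
--     cur = [1] * n          # counts for layer len(a)
--     for x in reversed(a):
--         nxt = [0] * n
--         acc = 0
--         for j in range(n - 1, -1, -1):
--             if x <= b[j]:
--                 acc += cur[j]
--             nxt[j] = acc
--         cur = nxt
--     return cur[0]
-- ===== Notes on version B (the rewrite author's own statement) =====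
-- stated objective: faster
-- what changed: Replaced the memoized top-down recursion (which rescans b[b_idx:] inside every (a_idx,b_idx) state) by a bottom-up layered DP that sweeps b once per element of a, accumulating conditional suffix sums, O(len(a)*len(b)) instead of O(len(a)*len(b)^2).
import Mathlib
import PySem

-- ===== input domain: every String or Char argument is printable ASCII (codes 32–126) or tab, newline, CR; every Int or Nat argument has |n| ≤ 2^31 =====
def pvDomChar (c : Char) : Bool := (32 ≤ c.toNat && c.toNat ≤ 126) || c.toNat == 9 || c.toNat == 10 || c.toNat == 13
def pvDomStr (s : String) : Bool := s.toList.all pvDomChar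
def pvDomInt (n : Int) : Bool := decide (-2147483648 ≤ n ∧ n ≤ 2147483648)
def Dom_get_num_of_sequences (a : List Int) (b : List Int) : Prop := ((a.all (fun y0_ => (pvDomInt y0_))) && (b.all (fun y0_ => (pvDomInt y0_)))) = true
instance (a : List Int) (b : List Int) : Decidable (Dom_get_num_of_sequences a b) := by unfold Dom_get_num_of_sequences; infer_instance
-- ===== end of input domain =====

-- B replaces A's memoized top-down recursion (inner rescan over b per state) by a
-- layered bottom-up DP with suffix sums over b.


-- ===== PORT A =====
-- get_num_of_sequences_sub: the memoized recursion over (a_idx, b_idx), threading the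
-- mutated dp table through as state.  Inside Pre_ every dp/b/a access is in range, so
-- getD is exact there; the base test `a.length ≤ a_idx` agrees with Python's
-- `a_idx == len(a)` on every reachable state (a_idx never exceeds len(a)) and makes
-- the termination measure evident.
def get_num_of_sequences_sub (a : List Int) (b : List Int)
    (a_idx b_idx : Nat) (dp : List (List Int)) : Int × List (List Int) :=
  if _h : a.length ≤ a_idx then (1, dp)
  else if (dp.getD a_idx []).getD b_idx (-1) ≠ -1 then ((dp.getD a_idx []).getD b_idx (-1), dp)
  else
    -- res = 0; for i in range(b_idx, len(b)): if a[a_idx] <= b[i]: res += sub(a_idx+1, i)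
    let p := ((List.range b.length).drop b_idx).foldl
      (fun st i =>
        if a.getD a_idx 0 ≤ b.getD i 0 then
          let q := get_num_of_sequences_sub a b (a_idx + 1) i st.2
          (st.1 + q.1, q.2)
        else st) ((0 : Int), dp)
    -- dp[a_idx][b_idx] = res
    (p.1, p.2.set a_idx ((p.2.getD a_idx []).set b_idx p.1))
termination_by a.length - a_idx
decreasing_by omega

def get_num_of_sequences (a : List Int) (b : List Int) : Int :=
  (get_num_of_sequences_sub a b 0 0
    (List.replicate a.length (List.replicate b.length (-1 : Int)))).1

-- ===== PORT B =====
-- inner backward loop of Source B: nxt[j] = acc = Σ_{i ≥ j, x ≤ b[i]} cur[i],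
-- built back-to-front as structural recursion over the two lists in step.
def gnos_layer (x : Int) : List Int → List Int → List Int
  | bj :: bs, cj :: cs =>
    let rest := gnos_layer x bs cs
    ((if x ≤ bj then cj else 0) + rest.headD 0) :: rest
  | _, _ => []

def get_num_of_sequences_alt (a : List Int) (b : List Int) : Int :=
  if a = [] then 1
  else if b = [] then 0
  else
    -- cur = [1]*n; for x in reversed(a): cur = <suffix-sum layer>
    let cur := a.reverse.foldl (fun cur x => gnos_layer x b cur)
      (List.replicate b.length (1 : Int))
    cur.getD 0 0

-- ===== PRECONDITION & SPEC =====
-- Pre_ excludes exactly the inputs where Python A raises IndexError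
-- (nonempty a with empty b: dp[0][0] does not exist).
def Pre_get_num_of_sequences (a : List Int) (b : List Int) : Prop := a = [] ∨ b ≠ []
instance (a : List Int) (b : List Int) : Decidable (Pre_get_num_of_sequences a b) := by
  unfold Pre_get_num_of_sequences; infer_instance
def pvWitness_get_num_of_sequences : List Int × List Int := ([1, 2], [0, 1, 2, 3])

def Spec_get_num_of_sequences (a : List Int) (b : List Int) (out : Int) : Prop := out = get_num_of_sequences_alt a b
instance (a : List Int) (b : List Int) (out : Int) : Decidable (Spec_get_num_of_sequences a b out) := by unfold Spec_get_num_of_sequences; infer_instance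

-- ===== CLAIM (what is proved, stated in full; the proofs are below) =====
def Claim_equal_get_num_of_sequences : Prop := ∀ (a : List Int) (b : List Int), Dom_get_num_of_sequences a b → Pre_get_num_of_sequences a b → Spec_get_num_of_sequences a b (get_num_of_sequences a b)

-- ===== LEMMAS AND PROOFS =====

-- The mathematical count: gnos_cnt a b k j = number of non-decreasing index
-- assignments for a[k:] with all indices ≥ j.
def gnos_cnt (a b : List Int) : Nat → Nat → Int
  | k, j =>
    if h : a.length ≤ k then 1
    else (((List.range b.length).drop j).map
      (fun i => if a.getD k 0 ≤ b.getD i 0 then gnos_cnt a b (k + 1) i else 0)).sum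
termination_by k _ => a.length - k
decreasing_by omega

lemma gnos_cnt_base (a b : List Int) (k j : Nat) (h : a.length ≤ k) :
    gnos_cnt a b k j = 1 := by rw [gnos_cnt]; simp [h]

lemma gnos_cnt_step (a b : List Int) (k j : Nat) (h : ¬ a.length ≤ k) :
    gnos_cnt a b k j = (((List.range b.length).drop j).map
      (fun i => if a.getD k 0 ≤ b.getD i 0 then gnos_cnt a b (k + 1) i else 0)).sum := by
  rw [gnos_cnt]; simp [h]

lemma gnos_cnt_nonneg (a b : List Int) (k j : Nat) : 0 ≤ gnos_cnt a b k j := by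
  by_cases h : a.length ≤ k
  · rw [gnos_cnt_base a b k j h]; norm_num
  · rw [gnos_cnt_step a b k j h]
    apply List.sum_nonneg
    intro x hx
    simp only [List.mem_map] at hx
    obtain ⟨i, _, rfl⟩ := hx
    split
    · exact gnos_cnt_nonneg a b (k + 1) i
    · exact le_refl 0
termination_by a.length - k
decreasing_by omega

lemma gnos_cnt_oob (a b : List Int) (k j : Nat) (hk : ¬ a.length ≤ k)
    (hj : b.length ≤ j) : gnos_cnt a b k j = 0 := by
  rw [gnos_cnt_step a b k j hk, List.drop_eq_nil_of_le (by simpa using hj)]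
  simp

lemma gnos_cnt_rec (a b : List Int) (k j : Nat) (hk : ¬ a.length ≤ k)
    (hj : j < b.length) :
    gnos_cnt a b k j =
      (if a.getD k 0 ≤ b.getD j 0 then gnos_cnt a b (k + 1) j else 0)
        + gnos_cnt a b k (j + 1) := by
  rw [gnos_cnt_step a b k j hk, gnos_cnt_step a b k (j + 1) hk,
    List.drop_eq_getElem_cons (by simpa using hj)]
  simp

-- generic getD/set facts used for the dp table
lemma gnos_getD_set_self {α : Type} (l : List α) (i : Nat) (x d : α)
    (h : i < l.length) : (l.set i x).getD i d = x := by
  simp [List.getD_eq_getElem?_getD, h]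

lemma gnos_getD_set_ne {α : Type} (l : List α) (i j : Nat) (x d : α)
    (h : i ≠ j) : (l.set i x).getD j d = l.getD j d := by
  simp [List.getD_eq_getElem?_getD, h]

-- dp validity: rows have the right lengths and every entry is -1 or already correct.
def gnos_Valid (a b : List Int) (dp : List (List Int)) : Prop :=
  dp.length = a.length ∧
  ∀ k, (dp.getD k []).length = (if k < a.length then b.length else 0) ∧
    ∀ j, (dp.getD k []).getD j (-1) = -1 ∨ (dp.getD k []).getD j (-1) = gnos_cnt a b k j

lemma gnos_loop_correct (a b : List Int) (k : Nat)
    (IH : ∀ j dp, gnos_Valid a b dp →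
      (get_num_of_sequences_sub a b (k + 1) j dp).1 = gnos_cnt a b (k + 1) j ∧
      gnos_Valid a b (get_num_of_sequences_sub a b (k + 1) j dp).2) :
    ∀ (is : List Nat) (s : Int) (dp : List (List Int)), gnos_Valid a b dp →
      (is.foldl (fun st i =>
          if a.getD k 0 ≤ b.getD i 0 then
            let q := get_num_of_sequences_sub a b (k + 1) i st.2
            (st.1 + q.1, q.2)
          else st) (s, dp)).1
        = s + (is.map (fun i => if a.getD k 0 ≤ b.getD i 0 then gnos_cnt a b (k + 1) i else 0)).sum
      ∧ gnos_Valid a b (is.foldl (fun st i =>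
          if a.getD k 0 ≤ b.getD i 0 then
            let q := get_num_of_sequences_sub a b (k + 1) i st.2
            (st.1 + q.1, q.2)
          else st) (s, dp)).2 := by
  intro is
  induction is with
  | nil => intro s dp hv; simp [hv]
  | cons i is ih =>
    intro s dp hv
    by_cases hc : a.getD k 0 ≤ b.getD i 0
    · obtain ⟨h1, h2⟩ := IH i dp hv
      have := ih (s + (get_num_of_sequences_sub a b (k + 1) i dp).1)
        (get_num_of_sequences_sub a b (k + 1) i dp).2 h2
      simp only [List.foldl_cons, if_pos hc]
      refine ⟨?_, this.2⟩
      rw [this.1, h1, List.map_cons, List.sum_cons, if_pos hc]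
      ring
    · have := ih s dp hv
      simp only [List.foldl_cons, if_neg hc]
      refine ⟨?_, this.2⟩
      rw [this.1, List.map_cons, List.sum_cons, if_neg hc, zero_add]

lemma gnos_Valid_set (a b : List Int) (dp : List (List Int)) (k j : Nat) (v : Int)
    (hv : gnos_Valid a b dp) (hk : k < a.length) (hval : v = gnos_cnt a b k j) :
    gnos_Valid a b (dp.set k ((dp.getD k []).set j v)) := by
  obtain ⟨hlen, hrow⟩ := hv
  refine ⟨by simp [hlen], fun k' => ?_⟩
  by_cases hkk : k = k'
  · subst hkk
    rw [gnos_getD_set_self _ _ _ _ (by omega)]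
    refine ⟨by rw [List.length_set, (hrow k).1, if_pos hk], fun j' => ?_⟩
    by_cases hjj : j = j'
    · subst hjj
      by_cases hjl : j < (dp.getD k []).length
      · rw [gnos_getD_set_self _ _ _ _ hjl]
        exact Or.inr hval
      · rw [List.set_eq_of_length_le (by omega)]
        exact (hrow k).2 j
    · rw [gnos_getD_set_ne _ _ _ _ _ hjj]
      exact (hrow k).2 j'
  · rw [gnos_getD_set_ne _ _ _ _ _ hkk]
    exact hrow k'

lemma gnos_sub_correct (a b : List Int) :
    ∀ (m k j : Nat) (dp : List (List Int)), a.length - k ≤ m → gnos_Valid a b dp →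
      (get_num_of_sequences_sub a b k j dp).1 = gnos_cnt a b k j ∧
      gnos_Valid a b (get_num_of_sequences_sub a b k j dp).2 := by
  intro m
  induction m with
  | zero =>
    intro k j dp hm hv
    have hk : a.length ≤ k := by omega
    rw [get_num_of_sequences_sub]
    simp [hk, gnos_cnt_base a b k j hk, hv]
  | succ m ih =>
    intro k j dp hm hv
    by_cases hk : a.length ≤ k
    · rw [get_num_of_sequences_sub]
      simp [hk, gnos_cnt_base a b k j hk, hv]
    · rw [get_num_of_sequences_sub]
      simp only [dif_neg hk]
      by_cases hc : (dp.getD k []).getD j (-1) ≠ -1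
      · rcases (hv.2 k).2 j with h | h
        · exact absurd h hc
        · simp only [if_pos hc]
          exact ⟨h, hv⟩
      · rw [if_neg hc]
        have hloop := gnos_loop_correct a b k
          (fun j' dp' hv' => ih (k + 1) j' dp' (by omega) hv')
          ((List.range b.length).drop j) 0 dp hv
        simp only [zero_add] at hloop
        obtain ⟨h1, h2⟩ := hloop
        rw [← gnos_cnt_step a b k j hk] at h1
        refine ⟨h1, ?_⟩
        rw [h1]
        exact gnos_Valid_set a b _ k j _ h2 (by omega) rfl

lemma gnos_Valid_init (a b : List Int) :
    gnos_Valid a b (List.replicate a.length (List.replicate b.length (-1 : Int))) := by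
  refine ⟨by simp, fun k => ?_⟩
  by_cases hk : k < a.length
  · have : (List.replicate a.length (List.replicate b.length (-1 : Int))).getD k []
        = List.replicate b.length (-1 : Int) := by
      simp [List.getD_eq_getElem?_getD, hk]
    rw [this]
    refine ⟨by simp [hk], fun j => ?_⟩
    by_cases hj : j < b.length
    · exact Or.inl (by simp [List.getD_eq_getElem?_getD, hj])
    · exact Or.inl (by simp [List.getD_eq_getElem?_getD, hj])
  · have : (List.replicate a.length (List.replicate b.length (-1 : Int))).getD k []
        = [] := by
      simp [List.getD_eq_getElem?_getD, hk]
    rw [this]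
    exact ⟨by simp [hk], fun j => Or.inl rfl⟩

lemma gnos_A_eq_cnt (a b : List Int) :
    get_num_of_sequences a b = gnos_cnt a b 0 0 :=
  (gnos_sub_correct a b a.length 0 0 _ (by omega) (gnos_Valid_init a b)).1

-- ---- B side ----

def gnos_vec (a b : List Int) (k : Nat) : List Int :=
  (List.range b.length).map (fun j => gnos_cnt a b k j)

lemma gnos_vec_drop_cons (a b : List Int) (k j : Nat) (hj : j < b.length) :
    (gnos_vec a b k).drop j = gnos_cnt a b k j :: (gnos_vec a b k).drop (j + 1) := by
  rw [gnos_vec, List.drop_eq_getElem_cons (by simpa using hj)]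
  simp

lemma gnos_vec_drop_nil (a b : List Int) (k j : Nat) (hj : b.length ≤ j) :
    (gnos_vec a b k).drop j = [] := by
  apply List.drop_eq_nil_of_le
  simpa [gnos_vec] using hj

lemma gnos_layer_eq (a b : List Int) (k : Nat) (hk : ¬ a.length ≤ k) :
    ∀ (m j : Nat), b.length - j = m →
      gnos_layer (a.getD k 0) (b.drop j) ((gnos_vec a b (k + 1)).drop j)
        = (gnos_vec a b k).drop j := by
  intro m
  induction m with
  | zero =>
    intro j hm
    have hj : b.length ≤ j := by omega
    rw [List.drop_eq_nil_of_le hj, gnos_vec_drop_nil a b (k + 1) j hj,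
      gnos_vec_drop_nil a b k j hj]
    rfl
  | succ m ihm =>
    intro j hm
    have hj : j < b.length := by omega
    rw [List.drop_eq_getElem_cons hj, gnos_vec_drop_cons a b (k + 1) j hj,
      gnos_vec_drop_cons a b k j hj, gnos_layer,
      ihm (j + 1) (by omega)]
    have hhead : ((gnos_vec a b k).drop (j + 1)).headD 0 = gnos_cnt a b k (j + 1) := by
      by_cases hj1 : j + 1 < b.length
      · rw [gnos_vec_drop_cons a b k (j + 1) hj1]; rfl
      · rw [gnos_vec_drop_nil a b k (j + 1) (by omega),
          gnos_cnt_oob a b k (j + 1) hk (by omega)]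
        rfl
    rw [hhead]
    have hbj : b.getD j 0 = b[j] := by
      simp [List.getD_eq_getElem?_getD, List.getElem?_eq_getElem hj]
    rw [← hbj, ← gnos_cnt_rec a b k j hk hj]

lemma gnos_vec_top (a b : List Int) :
    gnos_vec a b a.length = List.replicate b.length (1 : Int) := by
  rw [gnos_vec, List.eq_replicate_iff]
  constructor
  · simp
  · intro x hx
    simp only [List.mem_map, List.mem_range] at hx
    obtain ⟨j, _, rfl⟩ := hx
    exact gnos_cnt_base a b a.length j le_rfl

lemma gnos_foldr_eq (a b : List Int) :
    ∀ (l : List Int) (k : Nat), a.drop k = l →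
      l.foldr (fun x cur => gnos_layer x b cur) (List.replicate b.length (1 : Int))
        = gnos_vec a b k := by
  intro l
  induction l with
  | nil =>
    intro k hdk
    have hk : a.length ≤ k := by
      have := congrArg List.length hdk
      simp at this
      omega
    rw [List.foldr_nil, ← gnos_vec_top a b]
    unfold gnos_vec
    apply List.map_congr_left
    intro j _
    rw [gnos_cnt_base a b a.length j le_rfl, gnos_cnt_base a b k j hk]
  | cons x l ihl =>
    intro k hdk
    have hk : k < a.length := by
      by_contra hkk
      rw [List.drop_eq_nil_of_le (by omega)] at hdk
      simp at hdk
    rw [List.drop_eq_getElem_cons hk] at hdk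
    obtain ⟨hx, hl⟩ := List.cons.inj hdk
    rw [List.foldr_cons, ihl (k + 1) hl]
    have hx' : x = a.getD k 0 := by
      rw [← hx]
      simp [List.getD_eq_getElem?_getD, List.getElem?_eq_getElem hk]
    rw [hx']
    have := gnos_layer_eq a b k (by omega) b.length 0 (by omega)
    simpa using this

lemma gnos_alt_eq_cnt (a b : List Int) (hb : b ≠ []) :
    get_num_of_sequences_alt a b = gnos_cnt a b 0 0 := by
  by_cases ha : a = []
  · subst ha
    rw [get_num_of_sequences_alt, if_pos rfl, gnos_cnt_base [] b 0 0 (by simp)]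
  · rw [get_num_of_sequences_alt, if_neg ha, if_neg hb]
    simp only [List.foldl_reverse]
    have hfold : a.foldr (fun x cur => gnos_layer x b cur)
        (List.replicate b.length (1 : Int)) = gnos_vec a b 0 :=
      gnos_foldr_eq a b a 0 (by simp)
    have hb0 : 0 < b.length := List.length_pos_iff.mpr hb
    rw [hfold, gnos_vec]
    simp [List.getD_eq_getElem?_getD, hb0]

theorem get_num_of_sequences_spec : Claim_equal_get_num_of_sequences := by
  intro a b _ hpre
  unfold Spec_get_num_of_sequences
  rcases hpre with ha | hb
  · subst ha
    rw [gnos_A_eq_cnt, get_num_of_sequences_alt, if_pos rfl,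
      gnos_cnt_base [] b 0 0 (by simp)]
  · rw [gnos_A_eq_cnt, gnos_alt_eq_cnt a b hb]
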